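-- pv_equiv track=rewrite | github.com/Projet-ingenierie-logiciel-2A-JerRouTes/projet2A | src/backend/utils/reset_database.py | _strip_sql_comments
-- ===== SOURCE A (Python) =====
-- def _strip_sql_comments(sql: str) -> str:
--     """
--     Retire les commentaires SQL pour détecter si un fichier contient
--     du SQL réellement exécutable (et pas juste des lignes '-- ...').
--
--     - enlève les lignes '-- ...'
--     - enlève les blocs '/* ... */'
--     """
--     # Enlever blocs /* ... */
--     out = []
--     i = 0
--     n = len(sql)
--     while i < n:
--         if i + 1 < n and sql[i] == "/" and sql[i + 1] == "*":
--             # skip until */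
--             i += 2
--             while i + 1 < n and not (sql[i] == "*" and sql[i + 1] == "/"):
--                 i += 1
--             i += 2  # skip */
--             continue
--         out.append(sql[i])
--         i += 1
--     no_block = "".join(out)
--
--     # Enlever commentaires -- ...
--     lines = []
--     for line in no_block.splitlines():
--         # on coupe au premier '--'
--         if "--" in line:
--             line = line.split("--", 1)[0]
--         lines.append(line)
--     return "\n".join(lines).strip()
-- ===== SOURCE B (Python) =====
-- def _strip_sql_comments(sql: str) -> str:
--     # Remove /* ... */ blocks by jumping with str.find instead of a char-by-char scan.
--     parts = []
--     rest = sql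
--     while True:
--         start = rest.find("/*")
--         if start == -1:
--             parts.append(rest)
--             break
--         parts.append(rest[:start])
--         end = rest.find("*/", start + 2)
--         if end == -1:
--             break
--         rest = rest[end + 2:]
--     no_block = "".join(parts)
--     # Cut each line at its first '--'
--     lines = [line.split("--", 1)[0] for line in no_block.splitlines()]
--     return "\n".join(lines).strip()
-- ===== Notes on version B (the rewrite author's own statement) =====
-- stated objective: faster
-- what changed: The char-by-char index scanner for /*...*/ blocks (outer while with a nested inner while) is replaced by a loop that jumps directly with str.find('/*') and str.find('*/', start+2) and concatenates the kept segments; the line pass becomes a comprehension.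
import Mathlib
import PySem

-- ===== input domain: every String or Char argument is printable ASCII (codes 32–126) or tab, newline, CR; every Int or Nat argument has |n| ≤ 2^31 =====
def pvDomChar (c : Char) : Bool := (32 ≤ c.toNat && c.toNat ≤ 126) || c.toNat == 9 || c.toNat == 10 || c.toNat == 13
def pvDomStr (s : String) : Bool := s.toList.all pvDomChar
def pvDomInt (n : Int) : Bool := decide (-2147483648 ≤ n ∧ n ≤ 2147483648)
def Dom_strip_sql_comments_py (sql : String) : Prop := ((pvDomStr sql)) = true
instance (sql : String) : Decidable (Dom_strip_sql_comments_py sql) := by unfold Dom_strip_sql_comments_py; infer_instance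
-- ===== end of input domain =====

-- B replaces A's char-by-char index scanner for /*...*/ blocks by str.find jumps; return value only.

-- ===== PORT A =====
-- A's inner `while i+1 < n and not (sql[i] == "*" and sql[i+1] == "/")` scan
def pvInnerA (s : List Char) (i : Nat) : Nat :=
  if h : i + 1 < s.length ∧ ¬ (s.getD i ' ' = '*' ∧ s.getD (i + 1) ' ' = '/') then
    pvInnerA s (i + 1)
  else i
termination_by s.length - i
decreasing_by omega

-- needed by pvOuterA's decreasing_by
theorem pvInnerA_ge (s : List Char) (i : Nat) : i ≤ pvInnerA s i := by
  fun_induction pvInnerA <;> omega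

-- A's outer `while i < n` loop copying chars and skipping /* ... */ blocks
def pvOuterA (s : List Char) (i : Nat) (out : List Char) : List Char :=
  if _h : i < s.length then
    if i + 1 < s.length ∧ s.getD i ' ' = '/' ∧ s.getD (i + 1) ' ' = '*' then
      pvOuterA s (pvInnerA s (i + 2) + 2) out
    else
      pvOuterA s (i + 1) (out ++ [s.getD i ' '])
  else out
termination_by s.length - i
decreasing_by
  · have := pvInnerA_ge s (i + 2); omega
  · omega

-- `line.split("--", 1)[0] if "--" in line else line`
def pvCutA (line : List Char) : List Char :=
  if PySem.Chars.isIn ['-', '-'] line = true then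
    PySem.List.pyGetD (PySem.Chars.splitOnMax line ['-', '-'] 1) 0 []
  else line

def strip_sql_comments_py (sql : String) : String :=
  let noBlock := pvOuterA sql.toList 0 []
  let lines := (PySem.Chars.splitlines noBlock).foldl (fun acc line => acc ++ [pvCutA line]) []
  String.ofList (PySem.Chars.strip (PySem.Chars.join ['\n'] lines))

-- ===== PORT B =====
-- needed by pvLoopB's decreasing_by
theorem pvLoopB_dec (rest : List Char)
    (hs : ¬ PySem.Chars.find rest ['/', '*'] = -1)
    (he : ¬ PySem.Chars.findFrom rest ['*', '/'] (PySem.Chars.find rest ['/', '*'] + 2) = -1) :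
    (PySem.Chars.slice rest (some (PySem.Chars.findFrom rest ['*', '/'] (PySem.Chars.find rest ['/', '*'] + 2) + 2)) none).length < rest.length := by
  have h0 : (0 : Int) ≤ PySem.Chars.find rest ['/', '*'] := by
    have := PySem.Chars.neg_one_le_find rest ['/', '*']
    omega
  obtain ⟨hpre, -⟩ := PySem.Chars.find_spec h0
  have hlen2 : (PySem.Chars.find rest ['/', '*']).toNat + 2 ≤ rest.length := by
    have h1 := hpre.length_le
    simp only [List.length_drop, List.length_cons, List.length_nil] at h1
    omega
  have hcast : PySem.Chars.find rest ['/', '*'] + 2 =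
      (((PySem.Chars.find rest ['/', '*']).toNat + 2 : Nat) : Int) := by omega
  rw [hcast, PySem.Chars.findFrom_natCast rest ['*', '/'] _ hlen2] at he ⊢
  split at he
  · exact absurd rfl he
  · rename_i hf2
    have hf2' : (0 : Int) ≤ PySem.Chars.find
        (rest.drop ((PySem.Chars.find rest ['/', '*']).toNat + 2)) ['*', '/'] := by
      have := PySem.Chars.neg_one_le_find
        (rest.drop ((PySem.Chars.find rest ['/', '*']).toNat + 2)) ['*', '/']
      omega
    rw [if_neg hf2]
    simp only [PySem.Chars.slice_eq_listSlice]
    rw [PySem.List.slice_from _ (by omega)]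
    simp only [List.length_drop]
    omega

-- B's `while True` loop: jump to the next "/*" with find, cut, jump past the matching "*/"
def pvLoopB (rest : List Char) (parts : List (List Char)) : List Char :=
  if hs : PySem.Chars.find rest ['/', '*'] = -1 then
    PySem.Chars.join [] (parts ++ [rest])
  else
    if he : PySem.Chars.findFrom rest ['*', '/'] (PySem.Chars.find rest ['/', '*'] + 2) = -1 then
      PySem.Chars.join [] (parts ++ [PySem.Chars.slice rest none (some (PySem.Chars.find rest ['/', '*']))])
    else
      pvLoopB
        (PySem.Chars.slice rest (some (PySem.Chars.findFrom rest ['*', '/'] (PySem.Chars.find rest ['/', '*'] + 2) + 2)) none)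
        (parts ++ [PySem.Chars.slice rest none (some (PySem.Chars.find rest ['/', '*']))])
termination_by rest.length
decreasing_by exact pvLoopB_dec rest hs he

def strip_sql_comments_py_alt (sql : String) : String :=
  let noBlock := pvLoopB sql.toList []
  let lines := (PySem.Chars.splitlines noBlock).map
    (fun line => PySem.List.pyGetD (PySem.Chars.splitOnMax line ['-', '-'] 1) 0 [])
  String.ofList (PySem.Chars.strip (PySem.Chars.join ['\n'] lines))

-- ===== PRECONDITION & SPEC =====
def Spec_strip_sql_comments_py (sql : String) (out : String) : Prop := out = strip_sql_comments_py_alt sql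
instance (sql : String) (out : String) : Decidable (Spec_strip_sql_comments_py sql out) := by unfold Spec_strip_sql_comments_py; infer_instance

-- ===== CLAIM (what is proved, stated in full; the proofs are below) =====
def Claim_equal_strip_sql_comments_py : Prop := ∀ (sql : String), Dom_strip_sql_comments_py sql → Spec_strip_sql_comments_py sql (strip_sql_comments_py sql)

-- ===== LEMMAS AND PROOFS =====

-- reference function: both first passes delete each /*..*/ block (or an unterminated /* tail)
def pvAfterClose (t : List Char) : List Char :=
  if PySem.Chars.find t ['*', '/'] = -1 then []
  else t.drop ((PySem.Chars.find t ['*', '/']).toNat + 2)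

theorem pvAfterClose_length_le (t : List Char) : (pvAfterClose t).length ≤ t.length := by
  unfold pvAfterClose; split <;> simp

def pvR : List Char → List Char
  | [] => []
  | c :: t =>
    if c = '/' ∧ t.head? = some '*' then pvR (pvAfterClose t.tail)
    else c :: pvR t
termination_by l => l.length
decreasing_by
  · have h1 := pvAfterClose_length_le t.tail
    have h2 : t.tail.length ≤ t.length := by cases t <;> simp
    simp; omega
  · simp

-- [a, b] is a prefix of l iff its first two entries are a and b
theorem pvPrefix2 (a b : Char) (l : List Char) :
    [a, b] <+: l ↔ (l[0]? = some a ∧ l[1]? = some b) := by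
  match l with
  | [] => simp
  | [x] => simp [List.prefix_cons_iff]
  | x :: y :: t =>
    simp [List.cons_prefix_cons]
    constructor <;> (rintro ⟨h1, h2⟩; exact ⟨h1.symm, h2.symm⟩)

-- characterize A's inner scan when the first "*/" at/after j sits at offset m
-- membership of a 2-char pattern at k, phrased on getD
theorem pvPrefixAt (a b : Char) (s : List Char) (k : Nat) :
    ([a, b] <+: s.drop k) ↔ (k + 1 < s.length ∧ s.getD k ' ' = a ∧ s.getD (k + 1) ' ' = b) := by
  rw [pvPrefix2]
  simp only [List.getElem?_drop, Nat.add_zero]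
  constructor
  · rintro ⟨h0, h1⟩
    have hlt : k + 1 < s.length := by
      by_contra hk
      rw [List.getElem?_eq_none (by omega)] at h1
      simp at h1
    refine ⟨hlt, ?_, ?_⟩
    · rw [List.getD_eq_getElem?_getD, h0]; rfl
    · rw [List.getD_eq_getElem?_getD, h1]; rfl
  · rintro ⟨hlt, ha, hb⟩
    constructor
    · rw [List.getElem?_eq_getElem (by omega)]
      rw [List.getD_eq_getElem?_getD, List.getElem?_eq_getElem (by omega)] at ha
      simpa using ha
    · rw [List.getElem?_eq_getElem (by omega)]
      rw [List.getD_eq_getElem?_getD, List.getElem?_eq_getElem (by omega)] at hb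
      simpa using hb

theorem pvInnerA_found (s : List Char) (m : Nat) : ∀ (j : Nat),
    (['*', '/'] <+: s.drop (j + m)) →
    (∀ i < m, ¬ ['*', '/'] <+: s.drop (j + i)) →
    pvInnerA s j = j + m := by
  induction m with
  | zero =>
    intro j hpre _
    rw [pvPrefixAt] at hpre
    obtain ⟨hlt, ha, hb⟩ := hpre
    rw [pvInnerA, dif_neg]
    · omega
    · rintro ⟨-, hno⟩
      exact hno ⟨by simpa using ha, by simpa using hb⟩
  | succ m ih =>
    intro j hpre hmin
    have h0 : ¬ ['*', '/'] <+: s.drop (j + 0) := hmin 0 (by omega)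
    rw [pvPrefixAt] at h0 hpre
    have hlen : j + m + 2 < s.length + 1 := by omega
    rw [pvInnerA, dif_pos]
    · have := ih (j + 1) (by rw [pvPrefixAt]; exact ⟨by omega, by
        have := hpre.2.1; simpa [Nat.add_assoc, Nat.add_comm, Nat.add_left_comm] using this, by
        have := hpre.2.2; simpa [Nat.add_assoc, Nat.add_comm, Nat.add_left_comm] using this⟩)
        (fun i hi => by
          have := hmin (i + 1) (by omega)
          rw [pvPrefixAt] at this ⊢
          simpa [Nat.add_assoc, Nat.add_comm, Nat.add_left_comm] using this)
      omega
    · constructor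
      · omega
      · intro hmatch
        exact h0 ⟨by omega, hmatch.1, hmatch.2⟩

-- A's inner scan runs to the end when no "*/" occurs at/after j
theorem pvInnerA_nofound_aux (s : List Char) : ∀ (d j : Nat), s.length - j ≤ d →
    (∀ i : Nat, ¬ ['*', '/'] <+: s.drop (j + i)) → j ≤ s.length →
    s.length ≤ pvInnerA s j + 1 := by
  intro d
  induction d with
  | zero =>
    intro j hd _ _
    have := pvInnerA_ge s j
    omega
  | succ d ih =>
    intro j hd h hj
    rw [pvInnerA]
    split
    · rename_i hcond
      exact ih (j + 1) (by omega) (fun i => by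
        have := h (i + 1)
        simpa [Nat.add_assoc, Nat.add_comm, Nat.add_left_comm] using this) (by omega)
    · rename_i hcond
      rw [not_and_or, not_not] at hcond
      rcases hcond with hcond | hcond
      · omega
      · by_cases hlt : j + 1 < s.length
        · exact absurd ((pvPrefixAt '*' '/' s j).mpr ⟨hlt, hcond.1, hcond.2⟩)
            (by simpa using h 0)
        · omega

theorem pvInnerA_nofound (s : List Char) (j : Nat)
    (h : ∀ i : Nat, ¬ ['*', '/'] <+: s.drop (j + i)) (hj : j ≤ s.length) :
    s.length ≤ pvInnerA s j + 1 := pvInnerA_nofound_aux s (s.length - j) j (by omega) h hj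

-- A's first pass equals pvR
theorem pvDropDrop (s : List Char) (a b : Nat) : (s.drop a).drop b = s.drop (a + b) := by
  rw [List.drop_drop]

theorem pvOuterA_skip (s : List Char) (j : Nat) (hj : j + 2 ≤ s.length) :
    s.drop (pvInnerA s (j + 2) + 2) = pvAfterClose (s.drop (j + 2)) := by
  rcases eq_or_ne (PySem.Chars.find (s.drop (j + 2)) ['*', '/']) (-1) with hf | hf
  · unfold pvAfterClose
    rw [if_pos hf]
    have hinf := (PySem.Chars.find_eq_neg_one_iff _ _).mp hf
    have hno : ∀ i : Nat, ¬ ['*', '/'] <+: s.drop (j + 2 + i) := by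
      intro i hpre
      rw [← pvDropDrop] at hpre
      exact hinf (hpre.isInfix.trans (List.drop_suffix i (s.drop (j + 2))).isInfix)
    have := pvInnerA_nofound s (j + 2) hno hj
    exact List.drop_eq_nil_of_le (by omega)
  · have hf0 : (0 : Int) ≤ PySem.Chars.find (s.drop (j + 2)) ['*', '/'] := by
      have := PySem.Chars.neg_one_le_find (s.drop (j + 2)) ['*', '/']
      omega
    obtain ⟨hpre, hmin⟩ := PySem.Chars.find_spec hf0
    have h1 : ['*', '/'] <+: s.drop (j + 2 + (PySem.Chars.find (s.drop (j + 2)) ['*', '/']).toNat) := by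
      rw [← pvDropDrop]; exact hpre
    have h2 : ∀ i < (PySem.Chars.find (s.drop (j + 2)) ['*', '/']).toNat,
        ¬ ['*', '/'] <+: s.drop (j + 2 + i) := by
      intro i hi hp
      exact hmin i hi (by rw [← pvDropDrop] at hp; exact hp)
    rw [pvInnerA_found s _ (j + 2) h1 h2]
    unfold pvAfterClose
    rw [if_neg hf, pvDropDrop]
    congr 1

theorem pvOuterA_eq_pvR_aux (s : List Char) : ∀ (d j : Nat) (out : List Char), s.length - j ≤ d →
    pvOuterA s j out = out ++ pvR (s.drop j) := by
  intro d
  induction d with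
  | zero =>
    intro j out hd
    rw [pvOuterA, dif_neg (by omega), List.drop_eq_nil_of_le (by omega), pvR]
    simp
  | succ d ih =>
    intro j out hd
    by_cases hj : j < s.length
    · rw [pvOuterA, dif_pos hj]
      have hdrop : s.drop j = s.getD j ' ' :: s.drop (j + 1) := by
        rw [List.drop_eq_getElem_cons hj]
        congr 1
        rw [List.getD_eq_getElem?_getD, List.getElem?_eq_getElem hj]
        rfl
      have hhead : (s.drop (j + 1)).head? = s[j + 1]? := by simp
      by_cases hc : j + 1 < s.length ∧ s.getD j ' ' = '/' ∧ s.getD (j + 1) ' ' = '*'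
      · rw [if_pos hc]
        have hge := pvInnerA_ge s (j + 2)
        rw [ih (pvInnerA s (j + 2) + 2) out (by omega)]
        congr 1
        rw [pvOuterA_skip s j (by omega)]
        rw [hdrop, pvR, if_pos ?hcnd]
        case hcnd =>
          refine ⟨hc.2.1, ?_⟩
          rw [hhead, List.getElem?_eq_getElem hc.1]
          have := hc.2.2
          rw [List.getD_eq_getElem?_getD, List.getElem?_eq_getElem hc.1] at this
          simpa using congrArg some this
        rw [List.tail_drop]
      · rw [if_neg hc]
        rw [ih (j + 1) _ (by omega), hdrop, pvR, if_neg ?hne]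
        case hne =>
          rintro ⟨h1, h2⟩
          rw [hhead] at h2
          have hlt : j + 1 < s.length := by
            by_contra hk
            rw [List.getElem?_eq_none (by omega)] at h2
            simp at h2
          refine hc ⟨hlt, h1, ?_⟩
          rw [List.getD_eq_getElem?_getD, h2]
          rfl
        simp
    · rw [pvOuterA, dif_neg hj, List.drop_eq_nil_of_le (by omega), pvR]
      simp

theorem pvOuterA_eq_pvR (s : List Char) : ∀ (i : Nat) (out : List Char),
    pvOuterA s i out = out ++ pvR (s.drop i) :=
  fun i out => pvOuterA_eq_pvR_aux s (s.length - i) i out (by omega)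

-- pvR copies a region with no "/*"
theorem pvR_copy (k : Nat) : ∀ (l : List Char),
    (∀ j < k, ¬ ['/', '*'] <+: l.drop j) →
    pvR l = l.take k ++ pvR (l.drop k) := by
  induction k with
  | zero => intro l _; simp
  | succ k ih =>
    intro l h
    cases l with
    | nil => simp
    | cons c t =>
      have h0 := h 0 (by omega)
      rw [List.drop_zero, pvPrefix2] at h0
      have hcond : ¬ (c = '/' ∧ t.head? = some '*') := by
        rintro ⟨rfl, hh⟩
        exact h0 ⟨rfl, by cases t <;> simp_all⟩
      rw [pvR, if_neg hcond, List.take_succ_cons, List.drop_succ_cons,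
        ih t (fun j hj => by have := h (j + 1) (by omega); simpa using this)]
      simp

-- pvR is the identity where no "/*" occurs at all
theorem pvR_id (l : List Char) (h : ∀ j, ¬ ['/', '*'] <+: l.drop j) : pvR l = l := by
  induction l with
  | nil => rw [pvR]
  | cons c t ih =>
    rw [pvR]
    have h0 := h 0
    rw [List.drop_zero, pvPrefix2] at h0
    have hcond : ¬ (c = '/' ∧ t.head? = some '*') := by
      rintro ⟨rfl, hh⟩
      exact h0 ⟨rfl, by cases t <;> simp_all⟩
    rw [if_neg hcond, ih (fun j => by have := h (j + 1); simpa using this)]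

-- "".join over an appended last part
theorem pvJoin_append (P : List (List Char)) (x : List Char) :
    PySem.Chars.join [] (P ++ [x]) = PySem.Chars.join [] P ++ x := by
  induction P with
  | nil => simp [PySem.Chars.join_nil, PySem.Chars.join_singleton]
  | cons p rest ih =>
    cases rest with
    | nil => simp [PySem.Chars.join_singleton, PySem.Chars.join_cons_cons]
    | cons q r =>
      rw [List.cons_append, PySem.Chars.join_cons_cons]
      rw [List.cons_append] at ih ⊢
      rw [PySem.Chars.join_cons_cons, ih]
      simp

-- B's first pass equals pvR
theorem pvLoopB_eq_pvR_aux : ∀ (d : Nat) (rest : List Char) (parts : List (List Char)),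
    rest.length ≤ d → pvLoopB rest parts = PySem.Chars.join [] parts ++ pvR rest := by
  intro d
  induction d with
  | zero =>
    intro rest parts hd
    have hnil : rest = [] := by cases rest <;> simp_all
    subst hnil
    rw [pvLoopB, dif_pos (by decide), pvJoin_append, pvR]
  | succ d ih =>
    intro rest parts hd
    rw [pvLoopB]
    by_cases hs : PySem.Chars.find rest ['/', '*'] = -1
    · rw [dif_pos hs, pvJoin_append]
      congr 1
      symm
      apply pvR_id
      intro j hp
      have hinf := (PySem.Chars.find_eq_neg_one_iff rest ['/', '*']).mp hs
      exact hinf (hp.isInfix.trans (List.drop_suffix j rest).isInfix)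
    · have h0 : (0 : Int) ≤ PySem.Chars.find rest ['/', '*'] := by
        have := PySem.Chars.neg_one_le_find rest ['/', '*']
        omega
      obtain ⟨hpre, hmin⟩ := PySem.Chars.find_spec h0
      have hlen2 : (PySem.Chars.find rest ['/', '*']).toNat + 2 ≤ rest.length := by
        have h1 := hpre.length_le
        simp only [List.length_drop, List.length_cons, List.length_nil] at h1
        omega
      obtain ⟨tl, htl⟩ := hpre
      have htl' : tl = rest.drop ((PySem.Chars.find rest ['/', '*']).toNat + 2) := by
        have h2 := congrArg (List.drop 2) htl
        rw [pvDropDrop] at h2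
        simpa using h2
      have hRrest : pvR rest = rest.take (PySem.Chars.find rest ['/', '*']).toNat ++
          pvR (pvAfterClose (rest.drop ((PySem.Chars.find rest ['/', '*']).toNat + 2))) := by
        rw [pvR_copy (PySem.Chars.find rest ['/', '*']).toNat rest
          (fun j hj hp => hmin j hj hp)]
        congr 1
        rw [← htl]
        show pvR ('/' :: '*' :: tl) = _
        rw [pvR, if_pos (by simp)]
        simp only [List.tail_cons]
        rw [htl']
      have hslice : PySem.Chars.slice rest none (some (PySem.Chars.find rest ['/', '*'])) =
          rest.take (PySem.Chars.find rest ['/', '*']).toNat := by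
        simp only [PySem.Chars.slice_eq_listSlice]
        exact PySem.List.slice_to rest h0
      rw [dif_neg hs]
      have hcast : PySem.Chars.find rest ['/', '*'] + 2 =
          (((PySem.Chars.find rest ['/', '*']).toNat + 2 : Nat) : Int) := by omega
      rw [hcast, PySem.Chars.findFrom_natCast rest ['*', '/'] _ hlen2]
      by_cases hf2 : PySem.Chars.find
          (rest.drop ((PySem.Chars.find rest ['/', '*']).toNat + 2)) ['*', '/'] = -1
      · rw [if_pos hf2, dif_pos rfl, pvJoin_append, hslice, hRrest]
        unfold pvAfterClose
        rw [if_pos hf2, pvR]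
        simp
      · have hf2' : (0 : Int) ≤ PySem.Chars.find
            (rest.drop ((PySem.Chars.find rest ['/', '*']).toNat + 2)) ['*', '/'] := by
          have := PySem.Chars.neg_one_le_find
            (rest.drop ((PySem.Chars.find rest ['/', '*']).toNat + 2)) ['*', '/']
          omega
        rw [if_neg hf2, dif_neg (by omega)]
        have hslice2 : PySem.Chars.slice rest
            (some ((((PySem.Chars.find rest ['/', '*']).toNat + 2 : Nat) : Int) +
              PySem.Chars.find (rest.drop ((PySem.Chars.find rest ['/', '*']).toNat + 2)) ['*', '/'] + 2)) none =
            pvAfterClose (rest.drop ((PySem.Chars.find rest ['/', '*']).toNat + 2)) := by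
          simp only [PySem.Chars.slice_eq_listSlice]
          rw [PySem.List.slice_from _ (by omega)]
          unfold pvAfterClose
          rw [if_neg hf2, pvDropDrop]
          congr 1
          omega
        rw [hslice2, hslice]
        rw [ih (pvAfterClose (rest.drop ((PySem.Chars.find rest ['/', '*']).toNat + 2)))
          (parts ++ [rest.take (PySem.Chars.find rest ['/', '*']).toNat]) (by
            have := pvAfterClose_length_le (rest.drop ((PySem.Chars.find rest ['/', '*']).toNat + 2))
            simp only [List.length_drop] at this
            omega)]
        rw [pvJoin_append, hRrest]
        simp

theorem pvLoopB_eq_pvR (rest : List Char) : ∀ (parts : List (List Char)),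
    pvLoopB rest parts = PySem.Chars.join [] parts ++ pvR rest :=
  fun parts => pvLoopB_eq_pvR_aux rest.length rest parts (by omega)

-- split("--", 1)[0] is the identity when "--" does not occur
theorem pvGo_no_sep (sep : List Char) : ∀ (fuel : Nat) (l : List Char), l.length < fuel →
    ∀ (m : Nat) (cur : List Char) (acc : List (List Char)),
    (∀ j : Nat, ¬ sep <+: l.drop j) →
    PySem.Chars.splitOnMax.go sep fuel m l cur acc = ((cur.reverse ++ l) :: acc).reverse := by
  intro fuel
  induction fuel with
  | zero => intro l hl; omega
  | succ f ih =>
    intro l hl m cur acc h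
    cases l with
    | nil => simp [PySem.Chars.splitOnMax.go]
    | cons c rest =>
      rw [PySem.Chars.splitOnMax.go]
      have hnp : sep.isPrefixOf (c :: rest) = false := by
        rcases Bool.eq_false_or_eq_true (sep.isPrefixOf (c :: rest)) with hb | hb
        · exact absurd (List.isPrefixOf_iff_prefix.mp hb) (by simpa using h 0)
        · exact hb
      by_cases hm : m = 0
      · rw [if_pos hm]
      · rw [if_neg hm, if_neg (by simp [hnp])]
        rw [ih rest (by simpa using hl) m (c :: cur) acc
          (fun j => by simpa using h (j + 1))]
        simp

theorem pvCutA_eq (line : List Char) :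
    pvCutA line = PySem.List.pyGetD (PySem.Chars.splitOnMax line ['-', '-'] 1) 0 [] := by
  unfold pvCutA
  by_cases h : PySem.Chars.isIn ['-', '-'] line = true
  · rw [if_pos h]
  · rw [if_neg h]
    have hnp : ∀ j : Nat, ¬ ['-', '-'] <+: line.drop j := by
      intro j hp
      exact h ((PySem.Chars.exists_prefix_drop_iff_isIn _ _).mp ⟨j, hp⟩)
    unfold PySem.Chars.splitOnMax
    rw [if_neg (by omega)]
    rw [pvGo_no_sep ['-', '-'] (line.length + 1) line (by omega) _ [] [] hnp]
    simp [PySem.List.pyGetD_zero_cons]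

-- ===== VERDICT (by name: the statement is the Claim_ definition above) =====
theorem strip_sql_comments_py_spec : Claim_equal_strip_sql_comments_py := by
  intro sql _
  unfold Spec_strip_sql_comments_py strip_sql_comments_py strip_sql_comments_py_alt
  dsimp only
  have h1 : pvOuterA sql.toList 0 [] = pvLoopB sql.toList [] := by
    rw [pvOuterA_eq_pvR sql.toList 0 [], pvLoopB_eq_pvR sql.toList []]
    simp [PySem.Chars.join_nil]
  rw [h1]
  congr 1
  rw [PySem.List.foldl_append_singleton_eq_map]
  rw [List.nil_append]
  have : List.map pvCutA (PySem.Chars.splitlines (pvLoopB sql.toList [])) =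
      List.map (fun line => PySem.List.pyGetD (PySem.Chars.splitOnMax line ['-', '-'] 1) 0 [])
        (PySem.Chars.splitlines (pvLoopB sql.toList [])) :=
    List.map_congr_left (fun line _ => pvCutA_eq line)
  rw [this]
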